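-- pv_equiv track=rewrite | github.com/DhruvMeduri/Stadium_Seating | BACKUP&TEST/compute_configs.py | encode_shape
-- ===== SOURCE A (Python) =====
-- def encode_shape(translated_shape,size):# This function encodes a shape as a binary string
--     encoding = ''
--     for r in range(0,-size,-1):
--         for c in range(0,size):
--             if [c,r] in translated_shape:
--                 encoding = encoding + '1'
--             else:
--                 encoding = encoding + '0'
--     return encoding
-- ===== SOURCE B (Python) =====
-- def encode_shape(translated_shape, size):
--     # Scatter pass: mark each in-range cell directly into a flat grid, then join.
--     if size <= 0:
--         return ''
--     grid = ['0'] * (size * size)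
--     for cell in translated_shape:
--         if len(cell) == 2:
--             c, r = cell
--             if 0 <= c < size and 0 <= -r < size:
--                 grid[(-r) * size + c] = '1'
--     return ''.join(grid)
-- ===== Notes on version B (the rewrite author's own statement) =====
-- stated objective: faster
-- what changed: Instead of scanning the whole grid and testing membership of each position in translated_shape (a linear scan per grid cell), B allocates a flat grid of '0' characters once and does a single scatter pass over translated_shape, writing '1' at index (-r)*size+c for each in-range cell, then joins.
import Mathlib
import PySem

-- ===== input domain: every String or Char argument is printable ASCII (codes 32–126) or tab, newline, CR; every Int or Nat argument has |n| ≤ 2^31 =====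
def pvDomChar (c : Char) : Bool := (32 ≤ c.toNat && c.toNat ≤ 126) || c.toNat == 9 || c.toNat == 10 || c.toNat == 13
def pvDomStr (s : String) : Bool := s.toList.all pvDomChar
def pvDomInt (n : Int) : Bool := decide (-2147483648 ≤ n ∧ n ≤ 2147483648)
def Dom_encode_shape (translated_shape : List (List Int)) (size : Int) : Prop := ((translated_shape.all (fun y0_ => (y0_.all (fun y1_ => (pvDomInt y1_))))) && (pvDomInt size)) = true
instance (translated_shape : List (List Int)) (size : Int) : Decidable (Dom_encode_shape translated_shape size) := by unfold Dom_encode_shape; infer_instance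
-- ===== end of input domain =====

-- B replaces A's grid scan with per-cell membership tests by one scatter pass over the
-- shape into a preallocated flat grid (faster: O(size^2 + n) vs O(size^2 * n)).

-- ===== PORT A =====
def encode_shape (translated_shape : List (List Int)) (size : Int) : String :=
  (PySem.List.pyRange 0 (-size) (-1)).foldl (fun encoding r =>
    (PySem.List.pyRange 0 size 1).foldl (fun encoding c =>
      if [c, r] ∈ translated_shape then encoding ++ "1" else encoding ++ "0") encoding) ""

-- ===== PORT B =====
-- one scatter step of Source B's loop body
def encShapeScatter (size : Int) (grid : List Char) (cell : List Int) : List Char :=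
  match cell with
  | [c, r] =>
      if 0 ≤ c ∧ c < size ∧ 0 ≤ -r ∧ -r < size then grid.set ((-r) * size + c).toNat '1'
      else grid
  | _ => grid

def encode_shape_alt (translated_shape : List (List Int)) (size : Int) : String :=
  if size ≤ 0 then "" else
  String.ofList (translated_shape.foldl (encShapeScatter size) (List.replicate (size * size).toNat '0'))

-- ===== PRECONDITION & SPEC =====
def Spec_encode_shape (translated_shape : List (List Int)) (size : Int) (out : String) : Prop := out = encode_shape_alt translated_shape size
instance (translated_shape : List (List Int)) (size : Int) (out : String) : Decidable (Spec_encode_shape translated_shape size out) := by unfold Spec_encode_shape; infer_instance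

-- ===== CLAIM (what is proved, stated in full; the proofs are below) =====
def Claim_equal_encode_shape : Prop := ∀ (translated_shape : List (List Int)) (size : Int), Dom_encode_shape translated_shape size → Spec_encode_shape translated_shape size (encode_shape translated_shape size)

-- ===== LEMMAS AND PROOFS =====

-- j-th grid index is hit by some cell of ts
def encHit (ts : List (List Int)) (size : Int) (j : Nat) : Bool :=
  ts.any fun cell => match cell with
    | [c, r] => decide (0 ≤ c ∧ c < size ∧ 0 ≤ -r ∧ -r < size) && (((-r) * size + c).toNat == j)
    | _ => false

theorem encHit_nil (size : Int) (j : Nat) : encHit [] size j = false := rfl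

theorem encHit_cons₂ (c r : Int) (ts : List (List Int)) (size : Int) (j : Nat) :
    encHit ([c, r] :: ts) size j =
      (decide (0 ≤ c ∧ c < size ∧ 0 ≤ -r ∧ -r < size) && (((-r) * size + c).toNat == j)
        || encHit ts size j) := rfl

theorem encHit_cons_nil (ts : List (List Int)) (size : Int) (j : Nat) :
    encHit ([] :: ts) size j = encHit ts size j := by simp [encHit]

theorem encHit_cons_one (x : Int) (ts : List (List Int)) (size : Int) (j : Nat) :
    encHit ([x] :: ts) size j = encHit ts size j := by simp [encHit]

theorem encHit_cons_long (x y z : Int) (w : List Int) (ts : List (List Int)) (size : Int) (j : Nat) :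
    encHit ((x :: y :: z :: w) :: ts) size j = encHit ts size j := by simp [encHit]

theorem encShapeScatter_nil (size : Int) (g : List Char) : encShapeScatter size g [] = g := rfl
theorem encShapeScatter_one (size : Int) (g : List Char) (x : Int) : encShapeScatter size g [x] = g := rfl
theorem encShapeScatter_long (size : Int) (g : List Char) (x y z : Int) (w : List Int) :
    encShapeScatter size g (x :: y :: z :: w) = g := rfl
theorem encShapeScatter_two (size : Int) (g : List Char) (c r : Int) :
    encShapeScatter size g [c, r] =
      (if 0 ≤ c ∧ c < size ∧ 0 ≤ -r ∧ -r < size then g.set ((-r) * size + c).toNat '1' else g) := rfl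

theorem encShapeScatter_length (size : Int) (g : List Char) (cell : List Int) :
    (encShapeScatter size g cell).length = g.length := by
  rcases cell with _ | ⟨c, _ | ⟨r, _ | ⟨z, w⟩⟩⟩
  · rfl
  · rfl
  · rw [encShapeScatter_two]; split <;> simp
  · rfl

theorem scatter_get (size : Int) (ts : List (List Int)) (g : List Char) (j : Nat) :
    (ts.foldl (encShapeScatter size) g)[j]? =
      if encHit ts size j then (if j < g.length then some '1' else none) else g[j]? := by
  induction ts generalizing g with
  | nil => simp [encHit_nil]
  | cons cell ts ih =>
      simp only [List.foldl_cons]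
      rw [ih, encShapeScatter_length]
      rcases cell with _ | ⟨c, _ | ⟨r, _ | ⟨z, w⟩⟩⟩
      · rw [encShapeScatter_nil, encHit_cons_nil]
      · rw [encShapeScatter_one, encHit_cons_one]
      · rw [encShapeScatter_two, encHit_cons₂]
        by_cases hc : 0 ≤ c ∧ c < size ∧ 0 ≤ -r ∧ -r < size
        · rw [if_pos hc, decide_eq_true hc, Bool.true_and]
          by_cases hj : ((-r) * size + c).toNat = j
          · subst hj
            rw [beq_self_eq_true, Bool.true_or, if_pos rfl]
            by_cases hh : encHit ts size ((-r) * size + c).toNat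
            · rw [if_pos hh]
            · rw [if_neg hh]
              by_cases hlt : ((-r) * size + c).toNat < g.length
              · rw [if_pos hlt, List.getElem?_set_self hlt]
              · rw [if_neg hlt, List.set_eq_of_length_le (by omega),
                    List.getElem?_eq_none (by omega)]
          · rw [List.getElem?_set_ne hj,
                show (((-r) * size + c).toNat == j) = false from beq_eq_false_iff_ne.mpr hj,
                Bool.false_or]
        · rw [if_neg hc, decide_eq_false hc, Bool.false_and, Bool.false_or]
      · rw [encShapeScatter_long, encHit_cons_long]

-- ===== A-side characterisation =====
def encBit (ts : List (List Int)) (c r : Int) : Char := if [c, r] ∈ ts then '1' else '0'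

theorem range_mul_flat (n m : Nat) (f : Nat → Nat → Char) :
    (List.range n).flatMap (fun r => (List.range m).map (fun c => f r c)) =
    (List.range (n * m)).map (fun j => f (j / m) (j % m)) := by
  rcases Nat.eq_zero_or_pos m with hm | hm
  · subst hm; simp
  · induction n with
    | zero => simp
    | succ n ih =>
        rw [List.range_succ, Nat.succ_mul, List.range_add, List.flatMap_append, ih,
          List.map_append, List.map_map]
        congr 1
        rw [List.flatMap_cons, List.flatMap_nil, List.append_nil]
        apply List.map_congr_left
        intro a ha
        rw [List.mem_range] at ha
        simp only [Function.comp_apply]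
        rw [Nat.mul_comm n m, Nat.mul_add_div hm, Nat.mul_add_mod,
            Nat.div_eq_of_lt ha, Nat.mod_eq_of_lt ha, Nat.add_zero]

-- a cell hitting index j makes encHit true
theorem encHit_of_mem (ts : List (List Int)) (size : Int) (c r : Int) (j : Nat)
    (hmem : [c, r] ∈ ts) (h : 0 ≤ c ∧ c < size ∧ 0 ≤ -r ∧ -r < size)
    (hidx : ((-r) * size + c).toNat = j) : encHit ts size j = true := by
  rw [encHit, List.any_eq_true]
  refine ⟨[c, r], hmem, ?_⟩
  show (decide (0 ≤ c ∧ c < size ∧ 0 ≤ -r ∧ -r < size) && (((-r) * size + c).toNat == j)) = true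
  rw [Bool.and_eq_true, decide_eq_true_iff, beq_iff_eq]
  exact ⟨h, hidx⟩

-- membership at grid position j ↔ encHit
theorem encBit_encHit (ts : List (List Int)) (size : Int) (hpos : 0 < size) (j : Nat)
    (hj : j < (size.toNat * size.toNat)) :
    encBit ts ((j % size.toNat : Nat) : Int) (-((j / size.toNat : Nat) : Int)) =
      (if encHit ts size j then '1' else '0') := by
  have hn : 0 < size.toNat := by omega
  have hsz : (size.toNat : Int) = size := by omega
  unfold encBit
  congr 1
  rw [eq_iff_iff]
  constructor
  · intro hmem
    have hmlt := Nat.mod_lt j hn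
    have hdlt := (Nat.div_lt_iff_lt_mul hn).mpr hj
    have hsum := Nat.div_add_mod j size.toNat
    generalize hP : j % size.toNat = p at hmem hmlt hsum
    generalize hQ : j / size.toNat = q at hmem hdlt hsum
    refine encHit_of_mem ts size ((p : Nat) : Int) (-((q : Nat) : Int)) j hmem ?_ ?_
    · simp only [neg_neg]
      refine ⟨by positivity, by omega, by positivity, by omega⟩
    · simp only [neg_neg]
      rw [show ((q : Nat) : Int) * size + ((p : Nat) : Int) = ((q * size.toNat + p : Nat) : Int) by
        push_cast; rw [hsz]]
      rw [Int.toNat_natCast, Nat.mul_comm]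
      exact hsum
  · intro hhit
    rw [encHit, List.any_eq_true] at hhit
    obtain ⟨cell, hmemc, hcond⟩ := hhit
    rcases cell with _ | ⟨c, _ | ⟨r, _ | ⟨z, w⟩⟩⟩
    · simp at hcond
    · simp at hcond
    · rw [Bool.and_eq_true, decide_eq_true_iff, beq_iff_eq] at hcond
      obtain ⟨⟨hc0, hcs, hr0, hrs⟩, hidx⟩ := hcond
      have hcn : c.toNat < size.toNat := by omega
      have hidx' : (-r).toNat * size.toNat + c.toNat = j := by
        have heq : ((-r) * size + c) = (((-r).toNat * size.toNat + c.toNat : Nat) : Int) := by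
          push_cast; rw [Int.toNat_of_nonneg hr0, Int.toNat_of_nonneg hc0, hsz]
        rw [heq, Int.toNat_natCast] at hidx
        exact hidx
      have hmod : j % size.toNat = c.toNat := by
        rw [← hidx', Nat.mul_comm, Nat.mul_add_mod, Nat.mod_eq_of_lt hcn]
      have hdiv : j / size.toNat = (-r).toNat := by
        rw [← hidx', Nat.mul_comm, Nat.mul_add_div hn, Nat.div_eq_of_lt hcn, Nat.add_zero]
      have hc : ((j % size.toNat : Nat) : Int) = c := by omega
      have hr : (-((j / size.toNat : Nat) : Int)) = r := by omega
      rw [hc, hr]; exact hmemc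
    · simp at hcond

theorem str_foldl_append (l : List Nat) (g : Nat → List Char) (s : String) :
    (l.foldl (fun e k => e ++ String.ofList (g k)) s) = s ++ String.ofList (l.flatMap g) := by
  induction l generalizing s with
  | nil => apply String.ext; simp
  | cons x l ih =>
      simp only [List.foldl_cons, List.flatMap_cons, ih]
      apply String.ext
      simp

theorem encode_shape_eq_list (ts : List (List Int)) (size : Int) :
    encode_shape ts size =
      String.ofList ((List.range size.toNat).flatMap (fun (r : Nat) =>
        (List.range size.toNat).map (fun (c : Nat) => encBit ts ((c:Int)) (-(r:Int))))) := by
  have inner : ∀ (l : List Nat) (r : Int) (s : String),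
      (l.foldl (fun e (k : Nat) => if [(k:Int), r] ∈ ts then e ++ "1" else e ++ "0") s)
      = s ++ String.ofList (l.map (fun (c : Nat) => encBit ts ((c:Int)) r)) := by
    intro l r
    induction l with
    | nil => intro s; apply String.ext; simp
    | cons x l ih =>
        intro s
        simp only [List.foldl_cons, List.map_cons, ih]
        unfold encBit
        split <;> (apply String.ext; simp)
  unfold encode_shape
  rw [PySem.List.pyRange_neg_one, PySem.List.pyRange_one]
  simp only [zero_sub, neg_neg, sub_zero, List.foldl_map, zero_add]
  simp only [inner]
  have happ := str_foldl_append (List.range size.toNat)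
      (fun (r : Nat) => (List.range size.toNat).map (fun (c : Nat) => encBit ts ((c:Int)) (-(r:Int)))) ""
  rw [happ]
  apply String.ext
  simp

-- ===== VERDICT (by name: the statement is the Claim_ definition above) =====
theorem encode_shape_spec : Claim_equal_encode_shape := by
  intro ts size _
  unfold Spec_encode_shape encode_shape_alt
  rw [encode_shape_eq_list]
  by_cases hle : size ≤ 0
  · simp [hle, Int.toNat_of_nonpos hle]
  · have hpos : 0 < size := by omega
    simp only [hle, if_false]
    congr 1
    rw [range_mul_flat size.toNat size.toNat (fun (r c : Nat) => encBit ts ((c:Int)) (-(r:Int)))]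
    have hNN : (size * size).toNat = size.toNat * size.toNat := by
      exact Int.toNat_mul (by omega) (by omega)
    apply List.ext_getElem?
    intro j
    rw [scatter_get]
    simp only [List.length_replicate, List.getElem?_map, List.getElem?_replicate, hNN]
    by_cases hj : j < size.toNat * size.toNat
    · rw [List.getElem?_range hj]
      simp only [Option.map_some]
      rw [encBit_encHit ts size hpos j hj]
      by_cases hh : encHit ts size j <;> simp [hh, hj]
    · rw [List.getElem?_eq_none (by rw [List.length_range]; omega)]
      simp only [Option.map_none]
      by_cases hh : encHit ts size j <;> simp [hh, hj]
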